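-- pv_equiv track=rewrite | github.com/srabon0/facerecognition-attndance-system-server-side-admin | program.py | jinja_strlist_to_intlist
-- ===== SOURCE A (Python) =====
-- def jinja_strlist_to_intlist(ching):
--   x=ching
--   z = []
--   for i in x:
--       if not i =="'" and not i == "[" and not i==" " and not i == "]" and not i== ",":
--           z.append(i)
--   id = []
--   for i in range(len(z)):
--       id.append((z[i]))
--   xs=list(''.join(id))
--   dx = ("".join(xs))
--   str = dx
--   n = 7
--   chunks = [str[i:i+n] for i in range(0, len(str), n)]
--   ids = [int(i) for i in chunks]
--   return ids
-- ===== SOURCE B (Python) =====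
-- def jinja_strlist_to_intlist(ching):
--     # single streaming pass: filter delimiters, group into 7-char buffers, convert on the fly
--     ids = []
--     buf = ''
--     for ch in ching:
--         if ch == "'" or ch == "[" or ch == " " or ch == "]" or ch == ",":
--             continue
--         buf += ch
--         if len(buf) == 7:
--             ids.append(int(buf))
--             buf = ''
--     if buf:
--         ids.append(int(buf))
--     return ids
-- ===== Notes on version B (the rewrite author's own statement) =====
-- stated objective: simpler
-- what changed: Replaces A's five intermediate passes (filter list, index-copy, two joins, slice comprehension, int map) by one streaming pass with a 7-character buffer that emits each int as it completes.
-- outside the precondition, e.g. on jinja_strlist_to_intlist('+5'): A returns [5], B returns [5]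
import Mathlib
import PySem

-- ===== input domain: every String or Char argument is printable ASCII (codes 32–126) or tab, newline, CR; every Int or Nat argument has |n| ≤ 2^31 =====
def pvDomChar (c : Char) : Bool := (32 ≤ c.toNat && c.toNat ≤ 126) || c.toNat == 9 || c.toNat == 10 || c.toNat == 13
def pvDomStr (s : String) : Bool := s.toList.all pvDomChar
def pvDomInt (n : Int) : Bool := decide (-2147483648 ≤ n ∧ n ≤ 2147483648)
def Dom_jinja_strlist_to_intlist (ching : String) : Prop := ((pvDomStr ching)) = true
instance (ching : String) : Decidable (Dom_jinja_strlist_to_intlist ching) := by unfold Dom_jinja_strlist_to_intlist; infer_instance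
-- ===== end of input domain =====

-- B is one streaming pass with a 7-char buffer instead of A's filter/copy/join/slice/convert pipeline (objective: simpler).

-- int(chunk); exact wherever Python's int() succeeds (Pre_ guarantees digit-only chunks)
def pvInt (cs : List Char) : Int := (PySem.Int.ofChars? cs).getD 0

-- ===== PORT A =====
def jinja_strlist_to_intlist (ching : String) : List Int :=
  let x := ching
  let z : List Char := x.toList.foldl
    (fun acc i => if ¬i = '\'' ∧ ¬i = '[' ∧ ¬i = ' ' ∧ ¬i = ']' ∧ ¬i = ',' then acc ++ [i] else acc) []
  let id : List Char := (PySem.List.pyRange 0 (PySem.List.len z) 1).foldl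
    (fun acc i => acc ++ [PySem.List.pyGetD z i ' ']) []
  let xs : List Char := id      -- list(''.join(id)) : the same characters
  let dx : List Char := xs      -- "".join(xs)
  let str := dx
  let n : Int := 7
  let chunks : List (List Char) := (PySem.List.pyRange 0 (PySem.List.len str) n).map
    (fun i => PySem.List.slice str (some i) (some (i + n)))
  chunks.map (fun i => pvInt i)

-- ===== PORT B =====
-- loop body of Source B ('in "'[ ]," ' written out as the five comparisons)
def altStep (st : List Int × List Char) (ch : Char) : List Int × List Char :=
  if ch = '\'' ∨ ch = '[' ∨ ch = ' ' ∨ ch = ']' ∨ ch = ',' then st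
  else
    let buf := st.2 ++ [ch]
    if buf.length = 7 then (st.1 ++ [pvInt buf], []) else (st.1, buf)

def jinja_strlist_to_intlist_alt (ching : String) : List Int :=
  let st := ching.toList.foldl altStep ([], [])
  if st.2 = [] then st.1 else st.1 ++ [pvInt st.2]

-- ===== PRECONDITION & SPEC =====
-- Pre_ excludes strings with non-digit payload (non-delimiter) characters: on most of those
-- Python's int() raises ValueError; the few that still parse (a correctly placed sign,
-- underscore or inner whitespace form such as "+5") are excluded with them.
def Pre_jinja_strlist_to_intlist (ching : String) : Prop :=
  (ching.toList.all (fun c => c = '\'' || c = '[' || c = ' ' || c = ']' || c = ',' || c.isDigit)) = true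
instance (ching : String) : Decidable (Pre_jinja_strlist_to_intlist ching) := by
  unfold Pre_jinja_strlist_to_intlist; infer_instance
def pvWitness_jinja_strlist_to_intlist : String := "['1234567', '7654321']"

def Spec_jinja_strlist_to_intlist (ching : String) (out : List Int) : Prop := out = jinja_strlist_to_intlist_alt ching
instance (ching : String) (out : List Int) : Decidable (Spec_jinja_strlist_to_intlist ching out) := by unfold Spec_jinja_strlist_to_intlist; infer_instance

-- ===== CLAIM (what is proved, stated in full; the proofs are below) =====
def Claim_equal_jinja_strlist_to_intlist : Prop := ∀ (ching : String), Dom_jinja_strlist_to_intlist ching → Pre_jinja_strlist_to_intlist ching → Spec_jinja_strlist_to_intlist ching (jinja_strlist_to_intlist ching)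

-- ===== LEMMAS AND PROOFS =====

-- the common reference: chunks of 7
def chunk7 (l : List Char) : List (List Char) :=
  if h : l = [] then [] else l.take 7 :: chunk7 (l.drop 7)
termination_by l.length
decreasing_by
  have : l.length ≠ 0 := by simpa using h
  simp only [List.length_drop]; omega

def pKeep (c : Char) : Bool := decide (¬c = '\'' ∧ ¬c = '[' ∧ ¬c = ' ' ∧ ¬c = ']' ∧ ¬c = ',')

theorem chunk7_small (l : List Char) (h0 : l ≠ []) (h : l.length ≤ 7) : chunk7 l = [l] := by
  rw [chunk7, dif_neg h0, List.take_of_length_le h, List.drop_eq_nil_of_le h, chunk7]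
  simp

theorem chunk7_full (buf r : List Char) (h : buf.length = 7) :
    chunk7 (buf ++ r) = buf :: chunk7 r := by
  have hne : buf ++ r ≠ [] := by
    cases buf with
    | nil => simp at h
    | cons a t => simp
  rw [chunk7, dif_neg hne, ← h, List.take_left, List.drop_left]

-- A's slice comprehension computes chunk7
theorem chunkA (l : List Char) :
    (List.range ((l.length + 6) / 7)).map (fun k => (l.drop (7 * k)).take 7) = chunk7 l := by
  by_cases h : l = []
  · subst h; simp [chunk7]
  · have hL : l.length ≠ 0 := by simpa using h
    have hN : (l.length + 6) / 7 = ((l.drop 7).length + 6) / 7 + 1 := by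
      simp only [List.length_drop]; omega
    rw [chunk7, dif_neg h, hN, List.range_succ_eq_map, List.map_cons, List.map_map]
    refine congrArg₂ _ (by simp) ?_
    rw [← chunkA (l.drop 7)]
    refine List.map_congr_left ?_
    intro k _
    simp only [Function.comp]
    rw [List.drop_drop]
    congr 2
    omega
termination_by l.length
decreasing_by
  have : l.length ≠ 0 := by simpa using h
  simp only [List.length_drop]; omega

theorem portA_aux (ching : String) :
    ((PySem.List.pyRange 0
      (PySem.List.len
        ((PySem.List.pyRange 0
            (PySem.List.len (ching.toList.foldl
              (fun acc i => if ¬i = '\'' ∧ ¬i = '[' ∧ ¬i = ' ' ∧ ¬i = ']' ∧ ¬i = ',' then acc ++ [i] else acc) []))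
            1).foldl
          (fun acc i => acc ++ [PySem.List.pyGetD (ching.toList.foldl
            (fun acc i => if ¬i = '\'' ∧ ¬i = '[' ∧ ¬i = ' ' ∧ ¬i = ']' ∧ ¬i = ',' then acc ++ [i] else acc) []) i ' ']) []))
      7).map
      (fun i => PySem.List.slice
        ((PySem.List.pyRange 0
            (PySem.List.len (ching.toList.foldl
              (fun acc i => if ¬i = '\'' ∧ ¬i = '[' ∧ ¬i = ' ' ∧ ¬i = ']' ∧ ¬i = ',' then acc ++ [i] else acc) []))
            1).foldl
          (fun acc i => acc ++ [PySem.List.pyGetD (ching.toList.foldl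
            (fun acc i => if ¬i = '\'' ∧ ¬i = '[' ∧ ¬i = ' ' ∧ ¬i = ']' ∧ ¬i = ',' then acc ++ [i] else acc) []) i ' ']) [])
        (some i) (some (i + 7)))).map
      (fun i => pvInt i) = (chunk7 (ching.toList.filter pKeep)).map pvInt := by
  rw [PySem.List.foldl_append_ite_eq_filter
      (fun i => ¬i = '\'' ∧ ¬i = '[' ∧ ¬i = ' ' ∧ ¬i = ']' ∧ ¬i = ',') ching.toList []]
  rw [PySem.List.foldl_pyRange_zero_pyGetD _ ' ' (fun acc v => acc ++ [v]) []]
  rw [PySem.List.foldl_append_singleton_eq_self]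
  have hk : (fun x => decide (¬x = '\'' ∧ ¬x = '[' ∧ ¬x = ' ' ∧ ¬x = ']' ∧ ¬x = ',')) = pKeep := rfl
  rw [hk]
  simp only [List.nil_append]
  set f := ching.toList.filter pKeep with hf
  have hrange : PySem.List.pyRange 0 (PySem.List.len f) 7
      = (List.range ((f.length + 6) / 7)).map (fun k : Nat => (0 : Int) + 7 * (k : Int)) := by
    have hcnt : (if (0:ℤ) < PySem.List.len f then (((PySem.List.len f) - 0 + 7 - 1) / 7).toNat else 0)
        = (f.length + 6) / 7 := by
      simp only [PySem.List.len_eq]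
      split_ifs with hpos <;> omega
    rw [PySem.List.pyRange_of_pos 0 (PySem.List.len f) (by norm_num), hcnt]
  rw [hrange, List.map_map, List.map_map, ← chunkA f, List.map_map]
  refine List.map_congr_left ?_
  intro k _
  simp only [Function.comp_apply]
  have h1 : (0 : Int) + 7 * (k : Int) = ((7 * k : Nat) : Int) := by push_cast; ring
  have h2 : (0 : Int) + 7 * (k : Int) + 7 = ((7 * k : Nat) : Int) + ((7 : Nat) : Int) := by push_cast; ring
  rw [h2, h1, PySem.List.slice_natCast_add]

theorem portA_eq (ching : String) :
    jinja_strlist_to_intlist ching = (chunk7 (ching.toList.filter pKeep)).map pvInt :=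
  portA_aux ching

theorem altInv (l : List Char) (ids : List Int) (buf : List Char) (h : buf.length < 7) :
    (if (l.foldl altStep (ids, buf)).2 = [] then (l.foldl altStep (ids, buf)).1
     else (l.foldl altStep (ids, buf)).1 ++ [pvInt (l.foldl altStep (ids, buf)).2])
    = ids ++ (chunk7 (buf ++ l.filter pKeep)).map pvInt := by
  induction l generalizing ids buf with
  | nil =>
    simp only [List.foldl_nil, List.filter_nil, List.append_nil]
    by_cases hb : buf = []
    · subst hb; simp [chunk7]
    · rw [if_neg hb, chunk7_small buf hb (by omega)]
      simp
  | cons c t ih =>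
    by_cases hd : c = '\'' ∨ c = '[' ∨ c = ' ' ∨ c = ']' ∨ c = ','
    · have hk : pKeep c = false := by simp [pKeep]; tauto
      simp only [List.foldl_cons, altStep, if_pos hd, List.filter_cons, hk]
      simpa using ih ids buf h
    · have hk : pKeep c = true := by simp [pKeep]; tauto
      have hrw : buf ++ (c :: t).filter pKeep = (buf ++ [c]) ++ t.filter pKeep := by
        simp [hk]
      by_cases h7 : (buf ++ [c]).length = 7
      · simp only [List.foldl_cons, altStep, if_neg hd, if_pos h7]
        rw [ih (ids ++ [pvInt (buf ++ [c])]) [] (by simp)]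
        rw [hrw, chunk7_full (buf ++ [c]) (t.filter pKeep) h7]
        simp
      · simp only [List.foldl_cons, altStep, if_neg hd, if_neg h7]
        rw [ih ids (buf ++ [c]) (by simp only [List.length_append, List.length_cons, List.length_nil] at h7 ⊢; omega)]
        rw [hrw]

theorem portB_eq (ching : String) :
    jinja_strlist_to_intlist_alt ching = (chunk7 (ching.toList.filter pKeep)).map pvInt := by
  unfold jinja_strlist_to_intlist_alt
  simpa using altInv ching.toList [] [] (by norm_num)

-- ===== VERDICT (by name: the statement is the Claim_ definition above) =====
theorem jinja_strlist_to_intlist_spec : Claim_equal_jinja_strlist_to_intlist := by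
  intro ching _ _
  unfold Spec_jinja_strlist_to_intlist
  rw [portA_eq, portB_eq]
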